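-- pv_equiv track=rewrite | github.com/ppkantorski/Alchemist-Repos | Fl4sh9174/fl4sh9174_aio.py | capitalize_hyphenated
-- ===== SOURCE A (Python) =====
-- def capitalize_hyphenated(word):
--     parts = word.split("-")
--     out = []
--     for p in parts:
--         if not p:
--             out.append("")
--         elif len(p) == 1:
--             out.append(p.upper())
--         else:
--             out.append(p[0].upper() + p[1:].lower())
--     return "-".join(out)
-- ===== SOURCE B (Python) =====
-- def capitalize_hyphenated(word):
--     out = []
--     start = True
--     for ch in word:
--         if ch == "-":
--             out.append(ch)
--             start = True
--         elif start:
--             out.append(ch.upper())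
--             start = False
--         else:
--             out.append(ch.lower())
--     return "".join(out)
-- ===== Notes on version B (the rewrite author's own statement) =====
-- stated objective: alternative
-- what changed: Replaces split-on-hyphen / per-segment transform / join with a single left-to-right character scan driven by a start-of-segment flag.
import Mathlib
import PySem

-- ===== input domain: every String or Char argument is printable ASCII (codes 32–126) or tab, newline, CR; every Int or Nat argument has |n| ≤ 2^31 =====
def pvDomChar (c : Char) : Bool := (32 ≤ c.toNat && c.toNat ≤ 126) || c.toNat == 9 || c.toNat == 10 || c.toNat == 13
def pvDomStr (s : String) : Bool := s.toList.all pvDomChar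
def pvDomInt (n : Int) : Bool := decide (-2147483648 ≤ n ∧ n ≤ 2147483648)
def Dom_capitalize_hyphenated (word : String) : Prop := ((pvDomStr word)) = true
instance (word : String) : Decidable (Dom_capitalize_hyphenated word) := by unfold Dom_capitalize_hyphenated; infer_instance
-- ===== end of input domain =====

-- B replaces A's split-on-hyphen / per-segment transform / join with a single character
-- scan driven by a start-of-segment flag (alternative decomposition, same cost).

-- ===== PORT A =====
-- the value appended for one hyphen-separated part p (the if/elif/else of A's loop body)
def capitalize_hyphenated_seg (p : List Char) : List Char :=
  if p.length = 0 then []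
  else if p.length = 1 then PySem.Chars.upper p
  else PySem.Chars.upper (PySem.List.slice p none (some 1)) ++
       PySem.Chars.lower (PySem.List.slice p (some 1) none)

def capitalize_hyphenated (word : String) : String :=
  let parts := PySem.Chars.splitOn word.toList ['-']
  let out := parts.foldl (fun out p => out ++ [capitalize_hyphenated_seg p]) []
  String.ofList (PySem.Chars.join ['-'] out)

-- ===== PORT B =====
def capitalize_hyphenated_alt (word : String) : String :=
  String.ofList
    ((word.toList.foldl
      (fun (acc : List Char × Bool) ch =>
        if ch = '-' then (acc.1 ++ [ch], true)
        else if acc.2 then (acc.1 ++ [PySem.Chars.upperChar ch], false)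
        else (acc.1 ++ [PySem.Chars.lowerChar ch], false))
      ([], true)).1)

-- ===== PRECONDITION & SPEC =====
def Spec_capitalize_hyphenated (word : String) (out : String) : Prop := out = capitalize_hyphenated_alt word
instance (word : String) (out : String) : Decidable (Spec_capitalize_hyphenated word out) := by unfold Spec_capitalize_hyphenated; infer_instance

-- ===== CLAIM (what is proved, stated in full; the proofs are below) =====
def Claim_equal_capitalize_hyphenated : Prop := ∀ (word : String), Dom_capitalize_hyphenated word → Spec_capitalize_hyphenated word (capitalize_hyphenated word)

-- ===== LEMMAS AND PROOFS =====

-- the per-segment transform, written structurally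
def pvCapSeg (p : List Char) : List Char :=
  match p with
  | [] => []
  | c :: t => PySem.Chars.upperChar c :: t.map PySem.Chars.lowerChar

-- splitOn on the single-char separator '-', written structurally (cur = reversed current piece)
def pvSplitAux : List Char → List Char → List (List Char)
  | [], cur => [cur.reverse]
  | c :: rest, cur =>
      if c = '-' then cur.reverse :: pvSplitAux rest [] else pvSplitAux rest (c :: cur)

-- B's scan, written structurally (s = at start of a segment)
def pvG : List Char → Bool → List Char
  | [], _ => []
  | c :: rest, s =>
      if c = '-' then '-' :: pvG rest true
      else (if s then PySem.Chars.upperChar c else PySem.Chars.lowerChar c) :: pvG rest false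

lemma pvGo_nil (fuel : Nat) (cur : List Char) (acc : List (List Char)) :
    PySem.Chars.splitOn.go ['-'] (fuel+1) [] cur acc = acc.reverse ++ [cur.reverse] := by
  rw [PySem.Chars.splitOn.go]; simp; omega

lemma pvGo_hyphen (fuel : Nat) (rest cur : List Char) (acc : List (List Char)) :
    PySem.Chars.splitOn.go ['-'] (fuel+1) ('-'::rest) cur acc
      = PySem.Chars.splitOn.go ['-'] fuel rest [] (cur.reverse :: acc) := by
  rw [PySem.Chars.splitOn.go]; simp [List.isPrefixOf]

lemma pvGo_other (fuel : Nat) (c : Char) (h : c ≠ '-') (rest cur : List Char)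
    (acc : List (List Char)) :
    PySem.Chars.splitOn.go ['-'] (fuel+1) (c::rest) cur acc
      = PySem.Chars.splitOn.go ['-'] fuel rest (c::cur) acc := by
  rw [PySem.Chars.splitOn.go]; simp [List.isPrefixOf, Ne.symm h]

lemma pvGo_eq : ∀ (l : List Char) (fuel : Nat), l.length < fuel →
    ∀ (cur : List Char) (acc : List (List Char)),
    PySem.Chars.splitOn.go ['-'] fuel l cur acc = acc.reverse ++ pvSplitAux l cur := by
  intro l
  induction l with
  | nil =>
      intro fuel hf cur acc
      obtain ⟨f, rfl⟩ : ∃ f, fuel = f + 1 := ⟨fuel - 1, by omega⟩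
      rw [pvGo_nil]; rfl
  | cons c rest ih =>
      intro fuel hf cur acc
      obtain ⟨f, rfl⟩ : ∃ f, fuel = f + 1 := ⟨fuel - 1, by omega⟩
      have hrest : rest.length < f := by simp at hf; omega
      by_cases hc : c = '-'
      · subst hc
        rw [pvGo_hyphen, ih f hrest [] (cur.reverse :: acc)]
        simp [pvSplitAux]
      · rw [pvGo_other f c hc, ih f hrest (c :: cur) acc]
        simp [pvSplitAux, hc]

lemma pvSplitOn_eq (l : List Char) : PySem.Chars.splitOn l ['-'] = pvSplitAux l [] := by
  unfold PySem.Chars.splitOn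
  rw [pvGo_eq l (l.length + 1) (by omega) [] []]
  simp

lemma pvSplitAux_ne_nil (l cur : List Char) : pvSplitAux l cur ≠ [] := by
  induction l generalizing cur with
  | nil => simp [pvSplitAux]
  | cons c rest ih => by_cases hc : c = '-' <;> simp [pvSplitAux, hc, ih]

lemma pvSeg_eq (p : List Char) : capitalize_hyphenated_seg p = pvCapSeg p := by
  match p with
  | [] => simp [capitalize_hyphenated_seg, pvCapSeg]
  | [c] => simp [capitalize_hyphenated_seg, pvCapSeg, PySem.Chars.upper]
  | c :: d :: t =>
      rw [capitalize_hyphenated_seg, PySem.List.slice_to _ (by norm_num),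
        PySem.List.slice_from _ (by norm_num)]
      simp [pvCapSeg, PySem.Chars.upper, PySem.Chars.lower]

lemma pvCapSeg_append (xs ys : List Char) (h : xs ≠ []) :
    pvCapSeg (xs ++ ys) = pvCapSeg xs ++ ys.map PySem.Chars.lowerChar := by
  match xs with
  | [] => exact absurd rfl h
  | c :: t => simp [pvCapSeg]

lemma pvKey : ∀ (l cur : List Char),
    PySem.Chars.join ['-'] ((pvSplitAux l cur).map pvCapSeg)
      = pvCapSeg cur.reverse ++ pvG l cur.isEmpty := by
  intro l
  induction l with
  | nil => intro cur; simp [pvSplitAux, pvG, PySem.Chars.join_singleton]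
  | cons c rest ih =>
      intro cur
      by_cases hc : c = '-'
      · subst hc
        rw [show pvSplitAux ('-'::rest) cur = cur.reverse :: pvSplitAux rest [] from by
          simp [pvSplitAux]]
        rcases hrest : pvSplitAux rest [] with _ | ⟨b, t⟩
        · exact absurd hrest (pvSplitAux_ne_nil rest [])
        · have hih := ih []
          rw [hrest] at hih
          rw [show pvCapSeg ([] : List Char).reverse ++ pvG rest ([] : List Char).isEmpty
                = pvG rest true from by simp [pvCapSeg]] at hih
          rw [List.map_cons, List.map_cons, PySem.Chars.join_cons_cons,
            ← List.map_cons (f := pvCapSeg) (a := b) (l := t), hih]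
          simp [pvG]
      · simp only [pvSplitAux, if_neg hc]
        rw [ih (c :: cur)]
        match cur with
        | [] => simp [pvCapSeg, pvG, hc]
        | d :: u =>
            rw [List.reverse_cons, pvCapSeg_append _ _ (by simp)]
            simp [pvG, hc]

lemma pvB_fold : ∀ (l : List Char) (acc : List Char) (s : Bool),
    (l.foldl
      (fun (acc : List Char × Bool) ch =>
        if ch = '-' then (acc.1 ++ [ch], true)
        else if acc.2 then (acc.1 ++ [PySem.Chars.upperChar ch], false)
        else (acc.1 ++ [PySem.Chars.lowerChar ch], false))
      (acc, s)).1 = acc ++ pvG l s := by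
  intro l
  induction l with
  | nil => intro acc s; simp [pvG]
  | cons c rest ih =>
      intro acc s
      by_cases hc : c = '-'
      · subst hc; simp only [List.foldl_cons]
        rw [ih]; simp [pvG]
      · cases s <;> simp only [List.foldl_cons, if_neg hc] <;> rw [ih] <;> simp [pvG, hc]

-- ===== VERDICT (by name: the statement is the Claim_ definition above) =====
theorem capitalize_hyphenated_spec : Claim_equal_capitalize_hyphenated := by
  intro word _
  unfold Spec_capitalize_hyphenated
  simp only [capitalize_hyphenated, capitalize_hyphenated_alt]
  rw [PySem.List.foldl_append_singleton_eq_map capitalize_hyphenated_seg, pvSplitOn_eq,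
    pvB_fold word.toList [] true]
  simp only [List.nil_append]
  rw [show (pvSplitAux word.toList []).map capitalize_hyphenated_seg
        = (pvSplitAux word.toList []).map pvCapSeg from List.map_congr_left (fun p _ => pvSeg_eq p)]
  rw [pvKey word.toList []]
  simp [pvCapSeg]
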